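-- pv_equiv track=rewrite | github.com/schait/advent-of-code-2021 | day5.py | get_overlaps
-- ===== SOURCE A (Python) =====
-- def get_overlaps(vents):
--     vents_set = set()
--     overlaps = set()
--     for vent in vents:
--         if vent in vents_set:
--             overlaps.add(vent)
--         else:
--             vents_set.add(vent)
--     return len(overlaps)
-- ===== SOURCE B (Python) =====
-- def get_overlaps(vents):
--     return sum(1 for v in set(vents) if vents.count(v) > 1)
-- ===== Notes on version B (the rewrite author's own statement) =====
-- stated objective: simpler
-- what changed: Replaces A's single pass maintaining two disjoint sets with a staged dedupe-then-scan: build the set of distinct points once, then for each distinct point run a separate vents.count scan and count those occurring more than once (a one-liner, at the cost of O(n*d) instead of O(n)).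
import Mathlib
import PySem

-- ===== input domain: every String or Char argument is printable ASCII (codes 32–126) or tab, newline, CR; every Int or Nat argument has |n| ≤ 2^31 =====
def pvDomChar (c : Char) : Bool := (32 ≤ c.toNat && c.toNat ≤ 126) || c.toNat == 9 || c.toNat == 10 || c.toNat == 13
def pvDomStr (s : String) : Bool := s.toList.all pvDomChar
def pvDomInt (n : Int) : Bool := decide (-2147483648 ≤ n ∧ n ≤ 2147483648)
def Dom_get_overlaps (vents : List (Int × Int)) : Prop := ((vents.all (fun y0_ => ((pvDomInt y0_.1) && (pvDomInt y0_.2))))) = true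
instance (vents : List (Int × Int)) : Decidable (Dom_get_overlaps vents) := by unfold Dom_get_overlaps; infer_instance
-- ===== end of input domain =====

-- B replaces A's two-set single pass with a staged dedupe-then-count-scan one-liner (simpler; same return value).


-- ===== PORT A =====
-- loop body of A: if vent in vents_set: overlaps.add(vent) else: vents_set.add(vent)
def pvStepA (p : PySem.Set (Int × Int) × PySem.Set (Int × Int)) (vent : Int × Int) :
    PySem.Set (Int × Int) × PySem.Set (Int × Int) :=
  if PySem.Set.contains p.1 vent then (p.1, PySem.Set.add p.2 vent)
  else (PySem.Set.add p.1 vent, p.2)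

def get_overlaps (vents : List (Int × Int)) : Int :=
  ((vents.foldl pvStepA (PySem.Set.empty, PySem.Set.empty)).2.length : Int)

-- ===== PORT B =====
-- sum(1 for v in set(vents) if vents.count(v) > 1)
def get_overlaps_alt (vents : List (Int × Int)) : Int :=
  (PySem.Set.ofList vents).foldl
    (fun acc v => if 1 < PySem.List.count vents v then acc + 1 else acc) 0

-- ===== PRECONDITION & SPEC =====
def Spec_get_overlaps (vents : List (Int × Int)) (out : Int) : Prop := out = get_overlaps_alt vents
instance (vents : List (Int × Int)) (out : Int) : Decidable (Spec_get_overlaps vents out) := by unfold Spec_get_overlaps; infer_instance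

-- ===== CLAIM (what is proved, stated in full; the proofs are below) =====
def Claim_equal_get_overlaps : Prop := ∀ (vents : List (Int × Int)), Dom_get_overlaps vents → Spec_get_overlaps vents (get_overlaps vents)

-- ===== LEMMAS AND PROOFS =====

-- membership in A's final overlaps set, for any starting state
lemma pvFoldA_mem (l : List (Int × Int)) :
    ∀ (s o : PySem.Set (Int × Int)) (x : Int × Int),
      (x ∈ (l.foldl pvStepA (s, o)).2 ↔ x ∈ o ∨ (x ∈ s ∧ x ∈ l) ∨ 2 ≤ l.count x) := by
  induction l with
  | nil => intro s o x; simp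
  | cons v t ih =>
    intro s o x
    by_cases hv : v ∈ s
    · have hst : pvStepA (s, o) v = (s, PySem.Set.add o v) := by simp [pvStepA, pysem, hv]
      rw [List.foldl_cons, hst, ih]
      by_cases hx : x = v
      · subst hx
        constructor
        · intro _; exact Or.inr (Or.inl ⟨hv, List.mem_cons_self⟩)
        · intro _; exact Or.inl (by simp [pysem])
      · have hvx : ¬ v = x := fun h => hx h.symm
        have h1 : x ∈ PySem.Set.add o v ↔ x ∈ o := by simp [pysem, hx]
        have h2 : x ∈ (v :: t) ↔ x ∈ t := by simp [hx]
        have h3 : (v :: t).count x = t.count x := by simp [hvx]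
        rw [h1, h2, h3]
    · have hst : pvStepA (s, o) v = (PySem.Set.add s v, o) := by simp [pvStepA, pysem, hv]
      rw [List.foldl_cons, hst, ih]
      by_cases hx : x = v
      · subst hx
        have hmem : x ∈ PySem.Set.add s x := by simp [pysem]
        have hc : (x :: t).count x = t.count x + 1 := by simp
        constructor
        · rintro (h | ⟨-, h⟩ | h)
          · exact Or.inl h
          · right; right; rw [hc]
            have := List.count_pos_iff.mpr h; omega
          · right; right; rw [hc]; omega
        · rintro (h | ⟨h, -⟩ | h)
          · exact Or.inl h
          · exact absurd h hv
          · rw [hc] at h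
            rcases Nat.lt_or_ge (t.count x) 2 with h2 | h2
            · right; left; exact ⟨hmem, List.count_pos_iff.mp (by omega)⟩
            · right; right; exact h2
      · have hvx : ¬ v = x := fun h => hx h.symm
        have h1 : x ∈ PySem.Set.add s v ↔ x ∈ s := by simp [pysem, hx]
        have h2 : x ∈ (v :: t) ↔ x ∈ t := by simp [hx]
        have h3 : (v :: t).count x = t.count x := by simp [hvx]
        rw [h1, h2, h3]

-- A's overlaps set stays duplicate-free
lemma pvFoldA_nodup (l : List (Int × Int)) :
    ∀ (s o : PySem.Set (Int × Int)), o.Nodup → ((l.foldl pvStepA (s, o)).2).Nodup := by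
  induction l with
  | nil => intro s o h; simpa using h
  | cons v t ih =>
    intro s o h
    rw [List.foldl_cons]
    by_cases hv : v ∈ s
    · have hst : pvStepA (s, o) v = (s, PySem.Set.add o v) := by simp [pvStepA, pysem, hv]
      rw [hst]; exact ih _ _ (PySem.Set.nodup_add o v h)
    · have hst : pvStepA (s, o) v = (PySem.Set.add s v, o) := by simp [pvStepA, pysem, hv]
      rw [hst]; exact ih _ _ h

-- ===== VERDICT (by name: the statement is the Claim_ definition above) =====
theorem get_overlaps_spec : Claim_equal_get_overlaps := by
  intro vents _
  unfold Spec_get_overlaps get_overlaps get_overlaps_alt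
  rw [PySem.List.foldl_ite_add_one, List.countP_eq_length_filter]
  have hA : ((vents.foldl pvStepA (PySem.Set.empty, PySem.Set.empty)).2).length
      = ((PySem.Set.ofList vents).filter
        (fun v => decide (1 < PySem.List.count vents v))).length := by
    apply List.Perm.length_eq
    apply (List.perm_ext_iff_of_nodup
      (pvFoldA_nodup vents _ _ List.nodup_nil)
      ((PySem.Set.nodup_ofList vents).filter _)).2
    intro x
    rw [pvFoldA_mem vents PySem.Set.empty [] x]
    have hm : x ∈ vents ↔ 0 < vents.count x := List.count_pos_iff.symm
    simp only [List.mem_filter, decide_eq_true_eq, PySem.Set.empty,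
      List.not_mem_nil, false_or, false_and, PySem.Set.mem_ofList, hm,
      PySem.List.count_eq]
    omega
  rw [hA]
  simp
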